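-- pv_equiv track=rewrite | github.com/mrigankpawagi/ProbeableProblems | code/q1/buggy/13_1.py | least_positive_index
-- ===== SOURCE A (Python) =====
-- def  least_positive_index(arr):
--     smallest_positive = float('inf')  # Initialize with positive infinity
--     last_occurrence_index = -1
--
--     for i in range(len(arr)):
--         if arr[i] > 0 and arr[i] <= smallest_positive:
--             smallest_positive = arr[i]
--             last_occurrence_index = i
--
--     return last_occurrence_index
-- ===== SOURCE B (Python) =====
-- def least_positive_index(arr):
--     m = min((x for x in arr if x > 0), default=None)
--     if m is None:
--         return -1
--     for i, v in reversed(list(enumerate(arr))):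
--         if v == m:
--             return i
--     return -1  # unreachable: m occurs in arr
-- ===== Notes on version B (the rewrite author's own statement) =====
-- stated objective: alternative
-- what changed: Replaces A's single fused scan carrying (smallest, last_index) state by two stateless passes: min over the positive elements, then a reversed scan for the first (= last) index holding that minimum.
import Mathlib
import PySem

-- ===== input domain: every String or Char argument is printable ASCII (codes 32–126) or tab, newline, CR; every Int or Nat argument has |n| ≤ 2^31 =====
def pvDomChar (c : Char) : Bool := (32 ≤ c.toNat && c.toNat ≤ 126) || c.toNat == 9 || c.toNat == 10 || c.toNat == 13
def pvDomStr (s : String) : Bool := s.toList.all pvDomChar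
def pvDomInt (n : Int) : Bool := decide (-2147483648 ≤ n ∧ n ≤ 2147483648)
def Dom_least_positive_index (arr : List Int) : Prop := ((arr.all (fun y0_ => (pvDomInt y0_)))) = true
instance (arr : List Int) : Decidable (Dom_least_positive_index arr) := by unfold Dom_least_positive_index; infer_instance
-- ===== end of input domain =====

-- B replaces A's fused stateful scan by two stateless passes (min of positives, then a
-- reversed scan for its first = last index); alternative decomposition, same cost.

-- ===== PORT A =====
-- A's loop state: (smallest_positive, last_occurrence_index); `none` plays float('inf')
-- (every Int is ≤ inf, exact since arr holds only ints).
def pvAStep (s : Option Int × Int) (p : Int × Int) : Option Int × Int :=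
  if (decide (0 < p.2) && (match s.1 with | none => true | some v => decide (p.2 ≤ v))) then
    (some p.2, p.1)
  else s

def least_positive_index (arr : List Int) : Int :=
  ((PySem.List.enumerate arr).foldl pvAStep (none, -1)).2

-- ===== PORT B =====
def pvAltFind (l : List (Int × Int)) (m : Int) : Int :=
  match l with
  | [] => -1
  | (i, v) :: rest => if v = m then i else pvAltFind rest m

def least_positive_index_alt (arr : List Int) : Int :=
  match PySem.List.min? (arr.filter (fun x => decide (0 < x))) (fun x => x) with
  | none => -1
  | some m => pvAltFind (PySem.List.enumerate arr).reverse m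

-- ===== PRECONDITION & SPEC =====
def Spec_least_positive_index (arr : List Int) (out : Int) : Prop := out = least_positive_index_alt arr
instance (arr : List Int) (out : Int) : Decidable (Spec_least_positive_index arr out) := by unfold Spec_least_positive_index; infer_instance

-- ===== CLAIM (what is proved, stated in full; the proofs are below) =====
def Claim_equal_least_positive_index : Prop := ∀ (arr : List Int), Dom_least_positive_index arr → Spec_least_positive_index arr (least_positive_index arr)

-- ===== LEMMAS AND PROOFS =====

-- min of a list with one element appended, in terms of min of the prefix
theorem pv_min_last (l : List Int) (x : Int) :
    PySem.List.min? (l ++ [x]) (fun y => y) =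
      some (match PySem.List.min? l (fun y => y) with | none => x | some m => min m x) := by
  cases l with
  | nil =>
    have h0 : PySem.List.min? ([] : List Int) (fun y => y) = none := by
      simp [PySem.List.min?_eq_none_iff]
    simp [PySem.List.min?_id_cons, h0]
  | cons a t => simp [PySem.List.min?_id_cons, List.foldl_append]

-- any value min? returns over the positive elements is positive
theorem pv_min_pos (l : List Int) (m : Int)
    (h : PySem.List.min? (l.filter (fun x => decide (0 < x))) (fun y => y) = some m) : 0 < m := by
  have := PySem.List.min?_mem h
  have := List.of_mem_filter this
  simpa using this

-- joint invariant, by induction on arr from the right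
theorem pv_main (arr : List Int) :
    (PySem.List.enumerate arr).foldl pvAStep (none, -1) =
      (PySem.List.min? (arr.filter (fun x => decide (0 < x))) (fun x => x),
       least_positive_index_alt arr) := by
  induction arr using List.reverseRecOn with
  | nil => decide
  | append_singleton l x ih =>
    have hen : PySem.List.enumerate (l ++ [x]) =
        PySem.List.enumerate l ++ [((l.length : Int), x)] := by
      simp [PySem.List.enumerate_append, PySem.List.enumerate_cons, PySem.List.enumerate_nil]
    rw [least_positive_index_alt, hen, List.foldl_append, ih]
    by_cases hx : 0 < x
    · have hfl : (l ++ [x]).filter (fun x => decide (0 < x)) =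
          l.filter (fun x => decide (0 < x)) ++ [x] := by
        simp [List.filter_append, hx]
      rw [hfl, pv_min_last]
      cases hm : PySem.List.min? (l.filter (fun x => decide (0 < x))) (fun y => y) with
      | none =>
        simp [pvAStep, pvAltFind, hx, List.reverse_append]
      | some m =>
        by_cases hle : x ≤ m
        · simp [pvAStep, pvAltFind, hx, hle, List.reverse_append]
        · have hlt : m < x := not_le.mp hle
          have hminm : min m x = m := min_eq_left (le_of_lt hlt)
          have hne : x ≠ m := by omega
          simp [pvAStep, pvAltFind, hx, hle, hminm, hne, least_positive_index_alt, hm,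
            List.reverse_append]
    · have hfl : (l ++ [x]).filter (fun x => decide (0 < x)) =
          l.filter (fun x => decide (0 < x)) := by
        simp [List.filter_append, hx]
      rw [hfl]
      cases hm : PySem.List.min? (l.filter (fun x => decide (0 < x))) (fun y => y) with
      | none => simp [pvAStep, hx, least_positive_index_alt, hm]
      | some m =>
        have hne : x ≠ m := by have := pv_min_pos l m hm; omega
        simp [pvAStep, pvAltFind, hx, hne, least_positive_index_alt, hm, List.reverse_append]

-- ===== VERDICT (by name: the statement is the Claim_ definition above) =====
theorem least_positive_index_spec : Claim_equal_least_positive_index := by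
  intro arr _
  unfold Spec_least_positive_index least_positive_index
  rw [pv_main]
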